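-- pv_equiv track=rewrite | github.com/RussellGuo/searching-algorithm | ntp.py | win
-- ===== SOURCE A (Python) =====
-- def win(a, b):
--     win_count = 0
--     assert (len(a) == len(b))
--     l = len(a)
--     for i in range(l):
--         for j in range(l):
--             if a[i] > b[j]:
--                 win_count += 1
--
--     return win_count > l * l / 2
-- ===== SOURCE B (Python) =====
-- def win(a, b):
--     # Sort b once; for each element of a, a hand-written binary search
--     # (bisect_left) counts how many elements of b are smaller.
--     sb = sorted(b)
--     n = len(sb)
--     total = 0
--     for x in a:
--         lo, hi = 0, n
--         while lo < hi:
--             mid = (lo + hi) // 2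
--             if sb[mid] < x:
--                 lo = mid + 1
--             else:
--                 hi = mid
--         total += lo
--     return 2 * total > len(a) * len(a)
-- ===== Notes on version B (the rewrite author's own statement) =====
-- stated objective: faster
-- what changed: Replaces the quadratic double loop comparing every a[i] with every b[j] by sorting b once and binary-searching each a[i] (hand-written bisect_left) to count smaller elements in O((n+m) log m).
import Mathlib
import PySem

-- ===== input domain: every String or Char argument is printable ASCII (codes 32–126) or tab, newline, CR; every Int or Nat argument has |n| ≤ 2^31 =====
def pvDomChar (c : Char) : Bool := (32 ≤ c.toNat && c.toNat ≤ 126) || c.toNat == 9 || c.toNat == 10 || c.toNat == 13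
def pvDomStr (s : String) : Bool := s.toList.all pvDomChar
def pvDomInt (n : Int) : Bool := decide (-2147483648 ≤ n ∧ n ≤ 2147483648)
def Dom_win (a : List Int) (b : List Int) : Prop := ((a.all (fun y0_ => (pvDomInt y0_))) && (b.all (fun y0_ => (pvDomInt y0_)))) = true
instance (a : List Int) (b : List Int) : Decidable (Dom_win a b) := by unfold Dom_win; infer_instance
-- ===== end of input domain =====

-- B sorts b once and counts, for each a[i], the elements of b below it by binary search
-- instead of A's quadratic double loop; same Boolean result on equal-length lists.


-- ===== PORT A =====
-- the final Python comparison 'win_count > l*l/2' is against the float l*l/2;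
-- for integers of this size it is exactly '2*win_count > l*l', which is how it is ported
def win (a : List Int) (b : List Int) : Bool :=
  let l := a.length
  let wc := (List.range l).foldl (fun acc i =>
      (List.range l).foldl (fun acc2 j =>
        if a.getD i 0 > b.getD j 0 then acc2 + 1 else acc2) acc) 0
  decide (2 * wc > l * l)

-- ===== PORT B =====
-- Source B's hand-written bisect_left while-loop (lo/hi halving), transliterated with a fuel
-- counter hi - lo that bounds the number of iterations; indices stay in range, so getD is exact
def bisectGo (sb : List Int) (x : Int) : Nat → Nat → Nat → Nat
  | 0, lo, _ => lo
  | fuel + 1, lo, hi =>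
    if lo < hi then
      let mid := (lo + hi) / 2
      if sb.getD mid 0 < x then bisectGo sb x fuel (mid + 1) hi
      else bisectGo sb x fuel lo mid
    else lo

def bisectLoop (sb : List Int) (x : Int) (lo hi : Nat) : Nat :=
  bisectGo sb x (hi - lo) lo hi

def win_alt (a : List Int) (b : List Int) : Bool :=
  let sb := PySem.List.sorted b (fun x => x) false
  let n := sb.length
  let total := a.foldl (fun acc x => acc + bisectLoop sb x 0 n) 0
  decide (2 * total > a.length * a.length)

-- ===== PRECONDITION & SPEC =====
-- A's assert raises AssertionError when len(a) ≠ len(b); exactly those inputs are excluded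
def Pre_win (a : List Int) (b : List Int) : Prop := a.length = b.length
instance (a : List Int) (b : List Int) : Decidable (Pre_win a b) := by unfold Pre_win; infer_instance
def pvWitness_win : List Int × List Int := ([1, 2], [0, 3])

def Spec_win (a : List Int) (b : List Int) (out : Bool) : Prop := out = win_alt a b
instance (a : List Int) (b : List Int) (out : Bool) : Decidable (Spec_win a b out) := by unfold Spec_win; infer_instance

-- ===== CLAIM (what is proved, stated in full; the proofs are below) =====
def Claim_equal_win : Prop := ∀ (a : List Int) (b : List Int), Dom_win a b → Pre_win a b → Spec_win a b (win a b)

-- ===== LEMMAS AND PROOFS =====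

-- If (· < x) holds exactly on the first m positions of sb, then countP is m.
theorem pv_countP_split (sb : List Int) (x : Int) (m : Nat) (hm : m ≤ sb.length)
    (h1 : ∀ k (hk : k < sb.length), k < m → sb[k] < x)
    (h2 : ∀ k (hk : k < sb.length), m ≤ k → ¬ sb[k] < x) :
    sb.countP (fun y => decide (y < x)) = m := by
  conv_lhs => rw [← List.take_append_drop m sb]
  rw [List.countP_append]
  have ht : (sb.take m).countP (fun y => decide (y < x)) = (sb.take m).length := by
    rw [List.countP_eq_length]
    intro y hy
    obtain ⟨i, hi, hgi⟩ := List.getElem_of_mem hy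
    rw [List.getElem_take] at hgi
    have him : i < m := by simp at hi; omega
    have hil : i < sb.length := by omega
    simpa [← hgi] using h1 i hil him
  have hd : (sb.drop m).countP (fun y => decide (y < x)) = 0 := by
    rw [List.countP_eq_zero]
    intro y hy
    obtain ⟨i, hi, hgi⟩ := List.getElem_of_mem hy
    rw [List.getElem_drop] at hgi
    have hil : m + i < sb.length := by simp at hi; omega
    simpa [← hgi] using h2 (m + i) hil (Nat.le_add_right m i)
  rw [ht, hd, List.length_take]
  omega

-- Binary search returns the count of elements below x in a sorted list.
theorem pv_bisect_go (sb : List Int) (x : Int) (hs : sb.Pairwise (· ≤ ·)) :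
    ∀ (fuel lo hi : Nat), hi - lo ≤ fuel → lo ≤ hi → hi ≤ sb.length →
    (∀ k (hk : k < sb.length), k < lo → sb[k] < x) →
    (∀ k (hk : k < sb.length), hi ≤ k → ¬ sb[k] < x) →
    bisectGo sb x fuel lo hi = sb.countP (fun y => decide (y < x)) := by
  intro fuel
  induction fuel with
  | zero =>
    intro lo hi hn hlh hhl h1 h2
    have he : lo = hi := by omega
    subst he
    exact (pv_countP_split sb x lo (by omega) h1 h2).symm
  | succ n ih =>
    intro lo hi hn hlh hhl h1 h2
    by_cases h : lo < hi
    · rw [bisectGo, if_pos h]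
      set mid := (lo + hi) / 2 with hmid
      have hml : lo ≤ mid := by omega
      have hmh : mid < hi := by omega
      have hmlen : mid < sb.length := by omega
      have hget : sb.getD mid 0 = sb[mid] := List.getD_eq_getElem sb 0 hmlen
      have hpw := List.pairwise_iff_getElem.mp hs
      by_cases hc : sb.getD mid 0 < x
      · simp only [if_pos hc]
        apply ih (mid + 1) hi (by omega) (by omega) hhl
        · intro k hk hklt
          rcases Nat.lt_or_ge k lo with h' | h'
          · exact h1 k hk h'
          · rcases Nat.lt_or_ge k mid with h'' | h''
            · exact lt_of_le_of_lt (hpw k mid hk hmlen h'') (hget ▸ hc)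
            · have : k = mid := by omega
              subst this; exact hget ▸ hc
        · exact h2
      · simp only [if_neg hc]
        apply ih lo mid (by omega) (by omega) (by omega) h1
        intro k hk hkge
        rcases Nat.lt_or_ge k (mid + 1) with h' | h'
        · have : k = mid := by omega
          subst this; exact hget ▸ hc
        · intro hlt
          exact hc (hget ▸ lt_of_le_of_lt (hpw mid k hmlen hk (by omega)) hlt)
    · rw [bisectGo, if_neg h]
      have he : lo = hi := by omega
      subst he
      exact (pv_countP_split sb x lo (by omega) h1 h2).symm

theorem pv_bisect_count (sb : List Int) (x : Int) (hs : sb.Pairwise (· ≤ ·)) :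
    bisectLoop sb x 0 sb.length = sb.countP (fun y => decide (y < x)) := by
  unfold bisectLoop
  exact pv_bisect_go sb x hs (sb.length - 0) 0 sb.length (by omega) (by omega) le_rfl
    (by omega) (by intro k hk hge; omega)

-- A's inner loop counts the elements of b (first n of them) below v.
theorem pv_innerA (b : List Int) (v : Int) :
    ∀ (n : Nat), n ≤ b.length → ∀ (acc : Nat),
    (List.range n).foldl (fun acc2 j => if v > b.getD j 0 then acc2 + 1 else acc2) acc
      = acc + (b.take n).countP (fun y => decide (y < v)) := by
  intro n
  induction n with
  | zero => intro _ acc; simp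
  | succ n ih =>
    intro hn acc
    rw [List.range_succ, List.foldl_append, ih (by omega) acc]
    have hnl : n < b.length := by omega
    rw [List.take_add_one, List.countP_append]
    simp only [List.foldl_cons, List.foldl_nil, List.getElem?_eq_getElem hnl,
      List.getD_eq_getElem b 0 hnl, gt_iff_lt, Option.toList_some, List.countP_singleton]
    by_cases h : b[n] < v
    · simp only [h, decide_true, if_true, List.countP_cons, List.countP_nil, decide_true]
      omega
    · simp only [h, decide_false, Bool.false_eq_true, if_false, List.countP_cons, List.countP_nil, decide_false]
      omega

-- A's outer loop sums those counts over the first n elements of a.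
theorem pv_outerA (a b : List Int) (hl : a.length = b.length) :
    ∀ (n : Nat), n ≤ a.length → ∀ (acc : Nat),
    (List.range n).foldl (fun acc i =>
        (List.range a.length).foldl (fun acc2 j =>
          if a.getD i 0 > b.getD j 0 then acc2 + 1 else acc2) acc) acc
      = acc + ((a.take n).map (fun x => b.countP (fun y => decide (y < x)))).sum := by
  intro n
  induction n with
  | zero => intro _ acc; simp
  | succ n ih =>
    intro hn acc
    rw [List.range_succ, List.foldl_append, ih (by omega) acc]
    have hnl : n < a.length := by omega
    have hinner := pv_innerA b (a.getD n 0) a.length (by omega)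
    rw [List.foldl_cons, List.foldl_nil, hinner, hl, List.take_length]
    rw [List.take_add_one, List.map_append, List.sum_append]
    simp [List.getElem?_eq_getElem hnl, List.getD_eq_getElem a 0 hnl]
    omega

-- B's fold sums the same per-element counts.
theorem pv_foldB (b : List Int) :
    ∀ (a : List Int) (acc : Nat),
    a.foldl (fun acc x => acc + bisectLoop (PySem.List.sorted b (fun x => x) false) x 0
        (PySem.List.sorted b (fun x => x) false).length) acc
      = acc + (a.map (fun x => b.countP (fun y => decide (y < x)))).sum := by
  intro a
  induction a with
  | nil => intro acc; simp
  | cons x t ih =>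
    intro acc
    have hs : (PySem.List.sorted b (fun x => x) false).Pairwise (· ≤ ·) := by
      simpa using PySem.List.sorted_pairwise (xs := b) (key := fun x => x)
    have hperm : (PySem.List.sorted b (fun x => x) false).Perm b :=
      PySem.List.sorted_perm b (fun x => x) false
    have hb := pv_bisect_count (PySem.List.sorted b (fun x => x) false) x hs
    rw [List.foldl_cons, ih, hb, hperm.countP_eq]
    simp; omega

-- ===== VERDICT (by name: the statement is the Claim_ definition above) =====
theorem win_spec : Claim_equal_win := by
  intro a b _ hpre
  unfold Spec_win
  simp only [win, win_alt]
  have hA := pv_outerA a b hpre a.length le_rfl 0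
  rw [List.take_length] at hA
  rw [hA, pv_foldB b a 0]
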